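-- pv_equiv track=rewrite | github.com/AnshumanTripathi/maven-dependency-parser | dependency_parser.py | _compute_level
-- ===== SOURCE A (Python) =====
-- def _compute_level(dependency: str):
--     level = 1
--     for sym in dependency:
--         if sym == '|':
--             level += 1
--         elif sym == '+' or sym == '\\':
--             break
--     return level
-- ===== SOURCE B (Python) =====
-- def _compute_level(dependency: str):
--     p = dependency.find('+')
--     b = dependency.find('\\')
--     n = len(dependency)
--     boundary = min(p if p != -1 else n, b if b != -1 else n)
--     return 1 + dependency[:boundary].count('|')
-- ===== Notes on version B (the rewrite author's own statement) =====
-- stated objective: faster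
-- what changed: Replaces the early-break per-character counting loop with a two-phase locate-then-count: str.find locates the earliest terminator boundary and str.count counts pipe symbols on the prefix slice.
import Mathlib
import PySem

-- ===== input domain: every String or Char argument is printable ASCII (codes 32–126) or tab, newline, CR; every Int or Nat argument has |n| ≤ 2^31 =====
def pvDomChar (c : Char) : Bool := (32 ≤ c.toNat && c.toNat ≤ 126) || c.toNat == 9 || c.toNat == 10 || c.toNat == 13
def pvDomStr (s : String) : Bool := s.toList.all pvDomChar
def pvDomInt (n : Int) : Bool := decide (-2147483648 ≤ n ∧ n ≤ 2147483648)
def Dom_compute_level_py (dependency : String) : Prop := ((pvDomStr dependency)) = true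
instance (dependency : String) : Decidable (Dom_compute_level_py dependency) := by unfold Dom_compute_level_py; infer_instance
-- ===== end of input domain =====

-- B replaces the early-break counting loop by locate-then-count (find the terminator boundary, count pipes in the prefix); measured faster (C-level find/count vs per-char loop).

-- ===== PORT A =====
-- the for-loop with break, char by char
def aLoopCL : List Char → Int → Int
  | [], level => level
  | sym :: rest, level =>
    if sym = '|' then aLoopCL rest (level + 1)
    else if sym = '+' ∨ sym = '\\' then level
    else aLoopCL rest level

def compute_level_py (dependency : String) : Int :=
  aLoopCL dependency.toList 1

-- ===== PORT B =====
def compute_level_py_alt (dependency : String) : Int :=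
  let p := PySem.Str.find dependency "+"
  let b := PySem.Str.find dependency "\\"
  let n : Int := PySem.Str.len dependency
  let boundary := min (if p ≠ -1 then p else n) (if b ≠ -1 then b else n)
  1 + (PySem.Str.count (PySem.Str.slice dependency none (some boundary)) "|" : Int)

-- ===== PRECONDITION & SPEC =====
def Spec_compute_level_py (dependency : String) (out : Int) : Prop := out = compute_level_py_alt dependency
instance (dependency : String) (out : Int) : Decidable (Spec_compute_level_py dependency out) := by unfold Spec_compute_level_py; infer_instance

-- ===== CLAIM (what is proved, stated in full; the proofs are below) =====
def Claim_equal_compute_level_py : Prop := ∀ (dependency : String), Dom_compute_level_py dependency → Spec_compute_level_py dependency (compute_level_py dependency)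

-- ===== LEMMAS AND PROOFS =====

-- keep-going predicate of A's loop
def pvKeep (c : Char) : Bool := !(c == '+' || c == '\\')

-- A's loop counts '|' up to the first terminator
theorem aLoopCL_eq (cs : List Char) (lvl : Int) :
    aLoopCL cs lvl = lvl + ((cs.takeWhile pvKeep).count '|' : Int) := by
  induction cs generalizing lvl with
  | nil => simp [aLoopCL]
  | cons c rest ih =>
    by_cases h1 : c = '|'
    · subst h1
      simp [aLoopCL, pvKeep, List.takeWhile, ih, List.count_cons]
      push_cast; ring
    · by_cases h2 : c = '+' ∨ c = '\\'
      · have hc : pvKeep c = false := by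
          rcases h2 with h | h <;> simp [pvKeep, h]
        simp [aLoopCL, h1, h2, List.takeWhile, hc]
      · have hc : pvKeep c = true := by
          simp [pvKeep]; push_neg at h2; exact h2
        simp [aLoopCL, h1, h2, List.takeWhile, hc, ih, List.count_cons, h1]

-- Chars.count.go for a single-character needle counts occurrences
theorem countgo_single (c : Char) (cs : List Char) (fuel acc : Nat)
    (h : cs.length ≤ fuel) :
    PySem.Chars.count.go [c] fuel cs acc = acc + cs.count c := by
  induction cs generalizing fuel acc with
  | nil => cases fuel <;> simp [PySem.Chars.count.go]
  | cons x t ih =>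
    cases fuel with
    | zero => simp at h
    | succ f =>
      have hf : t.length ≤ f := by simpa using h
      by_cases hx : c = x
      · subst hx
        simp [PySem.Chars.count.go, List.isPrefixOf, ih _ _ hf, List.count_cons]
        omega
      · have : (c == x) = false := by simp [hx]
        simp [PySem.Chars.count.go, List.isPrefixOf, this, ih _ _ hf,
          List.count_cons, Ne.symm hx]

theorem count_single (c : Char) (cs : List Char) :
    PySem.Chars.count cs [c] = cs.count c := by
  simp [PySem.Chars.count, countgo_single c cs cs.length 0 (le_refl _)]

-- Chars.find.go for a single-character needle: first index, as takeWhile length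
theorem findgo_single (c : Char) (cs : List Char) (k : Nat) :
    PySem.Chars.find.go [c] cs k =
      if c ∈ cs then ((k : Int) + ((cs.takeWhile (fun x => x ≠ c)).length : Int)) else -1 := by
  induction cs generalizing k with
  | nil => simp [PySem.Chars.find.go]
  | cons x t ih =>
    by_cases hx : c = x
    · subst hx
      simp [PySem.Chars.find.go, List.isPrefixOf, List.takeWhile]
    · have hb : (c == x) = false := by simp [hx]
      have hx' : (x ≠ c) := Ne.symm hx
      simp [PySem.Chars.find.go, List.isPrefixOf, hb, ih, List.takeWhile, hx', hx]
      split <;> push_cast <;> ring_nf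

theorem find_single (c : Char) (cs : List Char) :
    PySem.Chars.find cs [c] =
      if c ∈ cs then (((cs.takeWhile (fun x => x ≠ c)).length : Int)) else -1 := by
  simpa using findgo_single c cs 0

-- if c is absent the takeWhile is the whole list
theorem takeWhile_ne_of_not_mem (c : Char) (cs : List Char) (h : c ∉ cs) :
    cs.takeWhile (fun x => x ≠ c) = cs := by
  apply List.takeWhile_eq_self_iff.mpr
  intro x hx
  simp
  rintro rfl; exact h hx

-- effective boundary for one terminator = takeWhile length, always
theorem boundary_single (c : Char) (cs : List Char) :
    (if PySem.Chars.find cs [c] ≠ -1 then PySem.Chars.find cs [c] else (cs.length : Int))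
      = ((cs.takeWhile (fun x => x ≠ c)).length : Int) := by
  rw [find_single]
  by_cases h : c ∈ cs
  · rw [if_pos h, if_pos (show (((cs.takeWhile (fun x => x ≠ c)).length : Int)) ≠ -1 by omega)]
  · rw [if_neg h, if_neg (show ¬((-1 : Int) ≠ -1) by simp), takeWhile_ne_of_not_mem c cs h]

-- takeWhile of a conjunction stops at the earlier stop: min of lengths
theorem takeWhile_and_length (p q : Char → Bool) (cs : List Char) :
    (cs.takeWhile (fun x => p x && q x)).length
      = min (cs.takeWhile p).length (cs.takeWhile q).length := by
  induction cs with
  | nil => simp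
  | cons x t ih =>
    by_cases hp : p x <;> by_cases hq : q x <;>
      simp [List.takeWhile, hp, hq, ih] <;> omega

-- ===== VERDICT (by name: the statement is the Claim_ definition above) =====
theorem compute_level_py_spec : Claim_equal_compute_level_py := by
  intro s _
  unfold Spec_compute_level_py compute_level_py compute_level_py_alt
  set cs := s.toList with hcs
  have hp := boundary_single '+' cs
  have hb := boundary_single '\\' cs
  have hK : pvKeep = fun x => decide (x ≠ '+') && decide (x ≠ '\\') := by
    funext x; by_cases h1 : x = '+' <;> by_cases h2 : x = '\\' <;> simp [pvKeep, h1, h2]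
  rw [aLoopCL_eq]
  simp only [PySem.Str.find_eq, PySem.Str.len_eq, PySem.Str.count_eq,
    PySem.Str.toList_slice, PySem.Chars.len_eq, PySem.Chars.slice_eq_listSlice]
  rw [show ("+" : String).toList = ['+'] from rfl, show ("\\" : String).toList = ['\\'] from rfl,
    show ("|" : String).toList = ['|'] from rfl]
  rw [hp, hb]
  have hmin : min (((cs.takeWhile (fun x => x ≠ '+')).length : Int))
      (((cs.takeWhile (fun x => x ≠ '\\')).length : Int))
      = ((cs.takeWhile pvKeep).length : Int) := by
    rw [hK, takeWhile_and_length]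
    push_cast; omega
  rw [hmin, PySem.List.slice_to _ (by positivity), Int.toNat_natCast]
  have hpre : cs.takeWhile pvKeep = cs.take (cs.takeWhile pvKeep).length := by
    exact (List.prefix_iff_eq_take.mp (List.takeWhile_prefix _))
  rw [← hpre, count_single]
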